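-- pv_equiv track=rewrite | github.com/pypi-data/pypi-mirror-129 | packages/libtgmk/libtgmk-0.4.2-py3-none-any.whl/libtgmk/__init__.py | int2tgmk
-- ===== SOURCE A (Python) =====
-- def int2tgmk(i):
--     '''convert integer i into a normalized TGMK literal:
--
--     >>> int2tgmk(-(3000 * 1024 + 1))
--     '-2M952K1'
-- '''
--     if not isinstance(i, int):
--         raise TypeError(f'invalid argument type for int2tgmk(): {i!r} is not an int')
--     elif -1024 < i < 1024:
--         return str(i)
--     else:
--         sign, num = ('-', -i) if i < 0 else ('', i)
--         tgmk = ''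
--         for char in ['','K','M','G','T','P','E','Z','Y']:
--             num, coef = (0, num) if char == 'Y' else divmod(num, 1024)
--             if coef > 0:
--                 tgmk = str(coef) + char + tgmk
--             if num == 0:
--                 return sign + tgmk
-- ===== SOURCE B (Python) =====
-- def int2tgmk(i):
--     '''convert integer i into a normalized TGMK literal (top-down digit extraction).'''
--     if not isinstance(i, int):
--         raise TypeError(f'invalid argument type for int2tgmk(): {i!r} is not an int')
--     if -1024 < i < 1024:
--         return str(i)
--     sign, num = ('-', -i) if i < 0 else ('', i)
--     suffixes = ['', 'K', 'M', 'G', 'T', 'P', 'E', 'Z', 'Y']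
--     parts = []
--     for k in range(8, -1, -1):
--         coef = num // 1024 ** 8 if k == 8 else (num // 1024 ** k) % 1024
--         if coef > 0:
--             parts.append(str(coef) + suffixes[k])
--     return sign + ''.join(parts)
-- ===== Notes on version B (the rewrite author's own statement) =====
-- stated objective: alternative
-- what changed: B replaces A's forward loop that repeatedly floor-divides num by the base with early return and prepends digits, by a single top-down pass that extracts each base-power coefficient directly (uncapped at the 'Y' catch-all) and appends the parts most-significant first.
import Mathlib
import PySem

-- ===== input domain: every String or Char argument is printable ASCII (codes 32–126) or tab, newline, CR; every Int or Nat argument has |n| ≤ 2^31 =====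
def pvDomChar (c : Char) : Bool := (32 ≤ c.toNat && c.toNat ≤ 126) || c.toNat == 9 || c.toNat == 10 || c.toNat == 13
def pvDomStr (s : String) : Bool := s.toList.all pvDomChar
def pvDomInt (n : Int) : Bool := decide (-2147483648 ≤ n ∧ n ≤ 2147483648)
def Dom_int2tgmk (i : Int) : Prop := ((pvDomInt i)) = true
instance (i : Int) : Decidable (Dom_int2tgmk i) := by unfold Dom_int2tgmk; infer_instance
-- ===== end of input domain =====

-- B replaces A's repeated divmod-by-the-base reduction with a top-down per-power digit
-- extraction (uncapped at the 'Y' catch-all), an alternative decomposition of the same cost.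


-- ===== PORT A =====
-- A's loop over the suffix list: repeated divmod by 1024, prepending digits, early return at num == 0.
-- The [] case is unreachable in Python (the 'Y' step forces num to 0); the accumulator is returned there.
-- The constant 'sign' prefix is applied by the caller.
def int2tgmkLoop : List String → Int → String → String
  | [], _, tgmk => tgmk
  | c :: rest, num, tgmk =>
    let step : Int × Int :=
      if c == "Y" then (0, num) else (PySem.Int.floordiv num 1024, PySem.Int.mod num 1024)
    let tgmk' := if step.2 > 0 then PySem.Int.toStr step.2 ++ c ++ tgmk else tgmk
    if step.1 == 0 then tgmk' else int2tgmkLoop rest step.1 tgmk'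

def int2tgmk (i : Int) : String :=
  if -1024 < i ∧ i < 1024 then PySem.Int.toStr i
  else
    (if i < 0 then "-" else "") ++
      int2tgmkLoop ["", "K", "M", "G", "T", "P", "E", "Z", "Y"] (if i < 0 then -i else i) ""

-- ===== PORT B =====
def pvSuffixes : List String := ["", "K", "M", "G", "T", "P", "E", "Z", "Y"]

-- one entry of Source B's loop body: str(coef)+suffixes[k] if coef > 0 else nothing
def int2tgmkPart (k : Nat) (num : Int) : String :=
  let coef := if k == 8 then PySem.Int.floordiv num (1024 ^ 8)
              else PySem.Int.mod (PySem.Int.floordiv num (1024 ^ k)) 1024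
  if coef > 0 then PySem.Int.toStr coef ++ pvSuffixes.getD k "" else ""

-- Source B's 'for k in range(8, -1, -1)' joined top-down, as recursion on k
def int2tgmkParts : Nat → Int → String
  | 0, num => int2tgmkPart 0 num
  | k + 1, num => int2tgmkPart (k + 1) num ++ int2tgmkParts k num

def int2tgmk_alt (i : Int) : String :=
  if -1024 < i ∧ i < 1024 then PySem.Int.toStr i
  else
    (if i < 0 then "-" else "") ++ int2tgmkParts 8 (if i < 0 then -i else i)

-- ===== PRECONDITION & SPEC =====
def Spec_int2tgmk (i : Int) (out : String) : Prop := out = int2tgmk_alt i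
instance (i : Int) (out : String) : Decidable (Spec_int2tgmk i out) := by unfold Spec_int2tgmk; infer_instance

-- ===== CLAIM (what is proved, stated in full; the proofs are below) =====
def Claim_equal_int2tgmk : Prop := ∀ (i : Int), Dom_int2tgmk i → Spec_int2tgmk i (int2tgmk i)

-- ===== LEMMAS AND PROOFS =====
lemma int2tgmk_main (num : Int) (h1 : 1024 ≤ num) (h2 : num < 1024 ^ 4) :
    int2tgmkLoop ["", "K", "M", "G", "T", "P", "E", "Z", "Y"] num "" = int2tgmkParts 8 num := by
  have hnn : (0:Int) ≤ num := by omega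
  have hlt : num < 1099511627776 := by norm_num at h2; omega
  have m2 : num / (1048576:Int) = num / 1024 / 1024 := by omega
  have m3 : num / (1073741824:Int) = num / 1024 / 1024 / 1024 := by omega
  have h4 : num / 1024 / 1024 / 1024 / 1024 = 0 := by omega
  have hne1 : ¬ num / 1024 = 0 := by omega
  have z4 : num / (1099511627776:Int) = 0 := Int.ediv_eq_zero_of_lt hnn (by omega)
  have z5 : num / (1125899906842624:Int) = 0 := Int.ediv_eq_zero_of_lt hnn (by omega)
  have z6 : num / (1152921504606846976:Int) = 0 := Int.ediv_eq_zero_of_lt hnn (by omega)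
  have z7 : num / (1180591620717411303424:Int) = 0 := Int.ediv_eq_zero_of_lt hnn (by omega)
  have z8 : num / (1208925819614629174706176:Int) = 0 := Int.ediv_eq_zero_of_lt hnn (by omega)
  have hBtop : int2tgmkParts 8 num = int2tgmkParts 3 num := by
    simp [int2tgmkParts, int2tgmkPart, z4, z5, z6, z7, z8]
  rw [hBtop]
  simp [int2tgmkLoop, int2tgmkParts, int2tgmkPart, pvSuffixes, h4, m2, m3, hne1]
  split_ifs <;> first | rfl | simp_all

-- ===== VERDICT (by name: the statement is the Claim_ definition above) =====
theorem int2tgmk_spec : Claim_equal_int2tgmk := by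
  intro i hdom
  unfold Spec_int2tgmk int2tgmk int2tgmk_alt
  by_cases hs : -1024 < i ∧ i < 1024
  · simp [hs]
  · simp only [if_neg hs]
    have hb : (1024:Int) ≤ (if i < 0 then -i else i) ∧ (if i < 0 then -i else i) < 1024 ^ 4 := by
      unfold Dom_int2tgmk pvDomInt at hdom
      simp only [decide_eq_true_eq] at hdom
      split <;> omega
    rw [int2tgmk_main _ hb.1 hb.2]
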